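-- pv_equiv track=rewrite | github.com/jathinchow/PROG-FOR-SCIENCE-INFORMATICS-1 | python basic.py | count_nucleotides_by_kilobase
-- ===== SOURCE A (Python) =====
-- def count_nucleotides_by_kilobase(sequence, kilobase_size=1000):
-- # Initialize a dictionary to hold nucleotide counts for each kilobase
--     nucleotide_counts = {}
-- # Iterate over the sequence in steps of kilobase_size
--     for i in range(0, len(sequence), kilobase_size):
-- # Extract the current kilobase segment from the sequence
--         kb_segment = sequence[i:i + kilobase_size]
-- # Count the occurrences of each nucleotide in the kilobase segment
--         counts = {
--             'A': kb_segment.count('A'),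
--             'C': kb_segment.count('C'),
--             'G': kb_segment.count('G'),
--             'T': kb_segment.count('T')
--         }
-- # Store the counts in the dictionary with the starting index of the kilobase as the key
--         nucleotide_counts[i] = counts
-- # Return the dictionary containing nucleotide counts for each kilobase
--     return nucleotide_counts
-- ===== SOURCE B (Python) =====
-- def count_nucleotides_by_kilobase(sequence, kilobase_size=1000):
--     counts = {}
--     for index, ch in enumerate(sequence):
--         key = index - index % kilobase_size
--         if key not in counts:
--             counts[key] = {'A': 0, 'C': 0, 'G': 0, 'T': 0}
--         if ch in counts[key]:
--             counts[key][ch] += 1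
--     return counts
-- ===== Notes on version B (the rewrite author's own statement) =====
-- stated objective: alternative
-- what changed: Replaces the segment-slicing loop with four str.count scans per segment by a single character-by-character pass over enumerate(sequence) that buckets each character into its segment's dict (key = index - index % kilobase_size), creating each segment's zeroed dict on first sight; asymptotically one pass instead of four, though CPython's C-level str.count makes A faster in wall-clock terms.
-- outside the precondition, e.g. on count_nucleotides_by_kilobase('A', -1): A returns {}, B returns {0: {'A': 1, 'C': 0, 'G': 0, 'T': 0}}
import Mathlib
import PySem

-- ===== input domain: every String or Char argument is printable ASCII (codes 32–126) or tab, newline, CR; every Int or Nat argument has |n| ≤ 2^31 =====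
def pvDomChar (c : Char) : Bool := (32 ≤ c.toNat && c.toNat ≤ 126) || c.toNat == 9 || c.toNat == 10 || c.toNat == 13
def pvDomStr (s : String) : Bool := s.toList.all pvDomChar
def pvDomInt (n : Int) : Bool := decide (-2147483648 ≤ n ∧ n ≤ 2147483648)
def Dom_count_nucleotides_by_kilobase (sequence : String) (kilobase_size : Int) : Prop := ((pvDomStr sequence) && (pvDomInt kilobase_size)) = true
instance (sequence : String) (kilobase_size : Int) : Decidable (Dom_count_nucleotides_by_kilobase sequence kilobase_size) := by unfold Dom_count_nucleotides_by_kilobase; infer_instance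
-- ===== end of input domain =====

-- B replaces A's per-segment slicing with four str.count scans by one character-by-character
-- pass that buckets each character into its segment's dict (alternative decomposition; return
-- value proved equal for kilobase_size ≥ 1).

-- ===== PORT A =====
def count_nucleotides_by_kilobase (sequence : String) (kilobase_size : Int) : List (Int × List (String × Int)) :=
  (((PySem.List.pyRange 0 (PySem.Str.len sequence) kilobase_size).foldl
      (fun nucleotide_counts i =>
        let kb_segment := PySem.Str.slice sequence (some i) (some (i + kilobase_size))
        nucleotide_counts.insert i (PySem.Dict.ofList
          [("A", (PySem.Str.count kb_segment "A" : Int)),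
           ("C", (PySem.Str.count kb_segment "C" : Int)),
           ("G", (PySem.Str.count kb_segment "G" : Int)),
           ("T", (PySem.Str.count kb_segment "T" : Int))]))
      (PySem.Dict.empty : PySem.Dict Int (PySem.Dict String Int))).items).map
    (fun p => (p.1, p.2.items))

-- ===== PORT B =====
def count_nucleotides_by_kilobase_alt (sequence : String) (kilobase_size : Int) : List (Int × List (String × Int)) :=
  (((PySem.List.enumerate sequence.toList).foldl
      (fun counts p =>
        let key := p.1 - PySem.Int.mod p.1 kilobase_size
        let counts := if counts.contains key then counts
          else counts.insert key (PySem.Dict.ofList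
            [("A",(0:Int)),("C",(0:Int)),("G",(0:Int)),("T",(0:Int))])
        let inner := counts.getD key PySem.Dict.empty
        if inner.contains (String.ofList [p.2]) then
          counts.insert key (inner.modify (String.ofList [p.2]) 0 (· + 1))
        else counts)
      (PySem.Dict.empty : PySem.Dict Int (PySem.Dict String Int))).items).map
    (fun p => (p.1, p.2.items))

-- ===== PRECONDITION & SPEC =====
-- Pre_ excludes non-positive kilobase_size: for 0 A raises ValueError (range step 0; B raises
-- ZeroDivisionError), and for negative sizes A's empty range accidentally returns {} while B
-- still buckets characters — a degenerate input outside the function's natural domain.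
def Pre_count_nucleotides_by_kilobase (sequence : String) (kilobase_size : Int) : Prop :=
  1 ≤ kilobase_size
instance (sequence : String) (kilobase_size : Int) : Decidable (Pre_count_nucleotides_by_kilobase sequence kilobase_size) := by unfold Pre_count_nucleotides_by_kilobase; infer_instance

def pvWitness_count_nucleotides_by_kilobase : String × Int := ("ACGTAX", 4)

def Spec_count_nucleotides_by_kilobase (sequence : String) (kilobase_size : Int) (out : List (Int × List (String × Int))) : Prop := out = count_nucleotides_by_kilobase_alt sequence kilobase_size
instance (sequence : String) (kilobase_size : Int) (out : List (Int × List (String × Int))) : Decidable (Spec_count_nucleotides_by_kilobase sequence kilobase_size out) := by unfold Spec_count_nucleotides_by_kilobase; infer_instance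

-- ===== CLAIM (what is proved, stated in full; the proofs are below) =====
def Claim_equal_count_nucleotides_by_kilobase : Prop := ∀ (sequence : String) (kilobase_size : Int), Dom_count_nucleotides_by_kilobase sequence kilobase_size → Pre_count_nucleotides_by_kilobase sequence kilobase_size → Spec_count_nucleotides_by_kilobase sequence kilobase_size (count_nucleotides_by_kilobase sequence kilobase_size)

-- ===== LEMMAS AND PROOFS =====

-- the two loop bodies, named for the proofs (definitionally the ports' lambdas)
def pvStepA (sequence : String) (kilobase_size : Int)
    (nucleotide_counts : PySem.Dict Int (PySem.Dict String Int)) (i : Int) :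
    PySem.Dict Int (PySem.Dict String Int) :=
  let kb_segment := PySem.Str.slice sequence (some i) (some (i + kilobase_size))
  nucleotide_counts.insert i (PySem.Dict.ofList
    [("A", (PySem.Str.count kb_segment "A" : Int)),
     ("C", (PySem.Str.count kb_segment "C" : Int)),
     ("G", (PySem.Str.count kb_segment "G" : Int)),
     ("T", (PySem.Str.count kb_segment "T" : Int))])

def pvStepB (kilobase_size : Int)
    (counts : PySem.Dict Int (PySem.Dict String Int)) (p : Int × Char) :
    PySem.Dict Int (PySem.Dict String Int) :=
  let key := p.1 - PySem.Int.mod p.1 kilobase_size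
  let counts := if counts.contains key then counts
    else counts.insert key (PySem.Dict.ofList
      [("A",(0:Int)),("C",(0:Int)),("G",(0:Int)),("T",(0:Int))])
  let inner := counts.getD key PySem.Dict.empty
  if inner.contains (String.ofList [p.2]) then
    counts.insert key (inner.modify (String.ofList [p.2]) 0 (· + 1))
  else counts

lemma pvA_eq (sequence : String) (k : Int) :
    count_nucleotides_by_kilobase sequence k =
      ((PySem.List.pyRange 0 (PySem.Str.len sequence) k).foldl (pvStepA sequence k)
        PySem.Dict.empty).items.map (fun p => (p.1, p.2.items)) := rfl

lemma pvB_eq (sequence : String) (k : Int) :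
    count_nucleotides_by_kilobase_alt sequence k =
      ((PySem.List.enumerate sequence.toList).foldl (pvStepB k)
        PySem.Dict.empty).items.map (fun p => (p.1, p.2.items)) := rfl

-- the four-nucleotide inner dict with symbolic counts
def pvInner (a c g t : Int) : PySem.Dict String Int :=
  PySem.Dict.mk [("A",a),("C",c),("G",g),("T",t)]

def pvCnt (seg : List Char) : PySem.Dict String Int :=
  pvInner (seg.count 'A') (seg.count 'C') (seg.count 'G') (seg.count 'T')

-- the common shape of both results: one entry per kilobase chunk, in order
def pvChunks (K : Nat) (start : Int) (cs : List Char) : List (Int × PySem.Dict String Int) :=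
  match K, cs with
  | 0, _ => []
  | _+1, [] => []
  | K'+1, c :: t => (start, pvCnt (c :: t.take K')) ::
      pvChunks (K'+1) (start + ((K'+1 : Nat) : Int)) (t.drop K')
termination_by cs.length
decreasing_by
  simp only [List.length_cons, List.length_drop]
  omega

lemma pvChunks_nil (K : Nat) (start : Int) : pvChunks K start [] = [] := by
  rw [pvChunks.eq_def]
  cases K <;> rfl

lemma pvChunks_cons (K' : Nat) (start : Int) (c : Char) (t : List Char) :
    pvChunks (K'+1) start (c :: t) = (start, pvCnt (c :: t.take K')) ::
      pvChunks (K'+1) (start + ((K'+1 : Nat) : Int)) (t.drop K') := by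
  rw [pvChunks.eq_def]

-- B's per-character inner update
def pvChStep (inner : PySem.Dict String Int) (c : Char) : PySem.Dict String Int :=
  if inner.contains (String.ofList [c]) then inner.modify (String.ofList [c]) 0 (· + 1) else inner

lemma pvSingle_eq (c c' : Char) : String.ofList [c] = String.ofList [c'] ↔ c = c' := by
  constructor
  · intro e
    have h2 := congrArg String.toList e
    simpa using h2
  · intro e; rw [e]

lemma pvChStep_inner (a c g t : Int) (ch : Char) :
    pvChStep (pvInner a c g t) ch =
      pvInner (if ch = 'A' then a + 1 else a) (if ch = 'C' then c + 1 else c)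
              (if ch = 'G' then g + 1 else g) (if ch = 'T' then t + 1 else t) := by
  by_cases hA : ch = 'A'
  · subst hA; rfl
  by_cases hC : ch = 'C'
  · subst hC; rfl
  by_cases hG : ch = 'G'
  · subst hG; rfl
  by_cases hT : ch = 'T'
  · subst hT; rfl
  have hcontains : (pvInner a c g t).contains (String.ofList [ch]) = false := by
    simp only [pvInner, PySem.Dict.contains, List.any_cons, List.any_nil, Bool.or_false,
      Bool.or_eq_false_iff, beq_eq_false_iff_ne, ne_eq]
    exact ⟨fun e => hA ((pvSingle_eq _ _).mp e.symm), fun e => hC ((pvSingle_eq _ _).mp e.symm),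
           fun e => hG ((pvSingle_eq _ _).mp e.symm), fun e => hT ((pvSingle_eq _ _).mp e.symm)⟩
  simp [pvChStep, hcontains, hA, hC, hG, hT]

lemma pvChFold (seg : List Char) : ∀ (a c g t : Int),
    seg.foldl pvChStep (pvInner a c g t) =
      pvInner (a + seg.count 'A') (c + seg.count 'C') (g + seg.count 'G') (t + seg.count 'T') := by
  induction seg with
  | nil => intro a c g t; simp [List.foldl]
  | cons ch rest ih =>
    intro a c g t
    simp only [List.foldl_cons, pvChStep_inner, ih]
    by_cases hA : ch = 'A' <;> by_cases hC : ch = 'C' <;> by_cases hG : ch = 'G' <;>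
      by_cases hT : ch = 'T' <;>
      simp_all [pvInner, List.count_cons] <;> push_cast <;> omega

-- Python str.count with a single-character needle is List.count
lemma pvCountGo_single (c : Char) : ∀ (s : List Char) (acc : Nat),
    PySem.Chars.count.go [c] s.length s acc = acc + s.count c := by
  intro s
  induction s with
  | nil => intro acc; simp [PySem.Chars.count.go]
  | cons h t ih =>
    intro acc
    by_cases hc : c = h
    · subst hc
      simp [PySem.Chars.count.go, List.isPrefixOf, ih, List.count_cons]
      omega
    · have hc' : ¬ h = c := fun e => hc e.symm
      simp [PySem.Chars.count.go, List.isPrefixOf, hc, hc', ih, List.count_cons]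

lemma pvCount_single (s : List Char) (c : Char) : PySem.Chars.count s [c] = s.count c := by
  simp [PySem.Chars.count, pvCountGo_single]

-- keys bounded above miss any fresh larger key
lemma pvNotContains {d : PySem.Dict Int (PySem.Dict String Int)} {b : Int}
    (h : ∀ key ∈ d.keys, key < b) : d.contains b = false := by
  cases hcb : d.contains b
  · rfl
  · have hb := (PySem.Dict.contains_iff_mem_keys (d := d) (k := b)).mp hcb
    exact absurd (h b hb) (lt_irrefl b)

-- key arithmetic of B: inside a chunk every index maps back to the chunk's start
lemma pvKey_eq {k start off : Int} (hk : 1 ≤ k) (hs : PySem.Int.mod start k = 0)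
    (h0 : 0 ≤ off) (hoff : off < k) :
    (start + off) - PySem.Int.mod (start + off) k = start := by
  obtain ⟨q, rfl⟩ := (PySem.Int.mod_eq_zero_iff_dvd start k).mp hs
  have hpos : (0:Int) < k := by omega
  rw [PySem.Int.mod_eq_emod_of_pos hpos]
  have h1 : (k * q + off) % k = off := by
    have h2 : k * q + off = off + k * q := by ring
    rw [h2, Int.add_mul_emod_self_left]
    exact Int.emod_eq_of_lt h0 hoff
  omega

lemma pvMod_add_self {k start : Int} (hk : 1 ≤ k) (hs : PySem.Int.mod start k = 0) :
    PySem.Int.mod (start + k) k = 0 := by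
  obtain ⟨q, rfl⟩ := (PySem.Int.mod_eq_zero_iff_dvd start k).mp hs
  rw [PySem.Int.mod_eq_emod_of_pos (by omega : (0:Int) < k)]
  have : k * q + k = k * (q + 1) := by ring
  rw [this]
  simp [Int.mul_emod_right]

-- cons form of range(a, b, k) for a positive step
lemma pvPyRange_cons {a b k : Int} (hk : 0 < k) (hab : a < b) :
    PySem.List.pyRange a b k = a :: PySem.List.pyRange (a + k) b k := by
  rw [PySem.List.pyRange_of_pos _ _ hk, PySem.List.pyRange_of_pos _ _ hk]
  have h1 : b - a + k - 1 = (b - a - 1) + 1 * k := by ring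
  have h2 : (b - a + k - 1) / k = (b - a - 1) / k + 1 := by
    rw [h1, Int.add_mul_ediv_right _ _ (by omega)]
  have h3 : 0 ≤ (b - a - 1) / k := Int.ediv_nonneg (by omega) (by omega)
  have htail : b - (a + k) + k - 1 = b - a - 1 := by ring
  have hcnt : ((b - a + k - 1) / k).toNat = ((b - a - 1) / k).toNat + 1 := by omega
  have htailcnt : (if a + k < b then ((b - (a + k) + k - 1) / k).toNat else 0)
      = ((b - a - 1) / k).toNat := by
    by_cases hb2 : a + k < b
    · rw [if_pos hb2, htail]
    · have hz : (b - a - 1) / k = 0 := Int.ediv_eq_zero_of_lt (by omega) (by omega)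
      rw [if_neg hb2, hz]
      simp
  rw [if_pos hab, htailcnt, hcnt, List.range_succ_eq_map, List.map_cons, List.map_map]
  congr 1
  · simp
  · apply List.map_congr_left
    intro x _
    simp only [Function.comp_apply]
    push_cast
    ring

lemma pvPyRange_nil {a b k : Int} (hk : 0 < k) (hab : b ≤ a) :
    PySem.List.pyRange a b k = [] := by
  rw [PySem.List.pyRange_of_pos _ _ hk]
  simp [if_neg (by omega : ¬ a < b)]

-- ===== A characterized by pvChunks =====
lemma pvA_items (sequence : String) (k : Int) (hk : 1 ≤ k) :
    ∀ (fuel : Nat) (start : Int) (d : PySem.Dict Int (PySem.Dict String Int)),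
      0 ≤ start → (sequence.toList.length : Int) - start ≤ fuel →
      (∀ key ∈ d.keys, key < start) →
      ((PySem.List.pyRange start (PySem.Str.len sequence) k).foldl (pvStepA sequence k) d).items
      = d.items ++ pvChunks k.toNat start (sequence.toList.drop start.toNat) := by
  have hlen : PySem.Str.len sequence = (sequence.toList.length : Int) := by
    simp [PySem.Str.len_eq]
  intro fuel
  induction fuel with
  | zero =>
    intro start d h0 hfuel hkeys
    have hle : sequence.toList.length ≤ start.toNat := by omega
    rw [hlen, pvPyRange_nil (by omega) (by omega), List.drop_eq_nil_of_le hle, pvChunks_nil]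
    simp
  | succ fuel ih =>
    intro start d h0 hfuel hkeys
    by_cases hend : (sequence.toList.length : Int) ≤ start
    · have hle : sequence.toList.length ≤ start.toNat := by omega
      rw [hlen, pvPyRange_nil (by omega) (by omega), List.drop_eq_nil_of_le hle, pvChunks_nil]
      simp
    · have hlt : start < (sequence.toList.length : Int) := by omega
      rw [hlen, pvPyRange_cons (by omega) (by omega), ← hlen]
      simp only [List.foldl_cons]
      have hseg : (PySem.Str.slice sequence (some start) (some (start + k))).toList
          = (sequence.toList.drop start.toNat).take k.toNat := by
        simp only [PySem.Str.toList_slice, PySem.Chars.slice_eq_listSlice]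
        rw [PySem.List.slice_toNat _ h0 (by omega)]
        congr 1
        omega
      have hval : ∀ (c : Char),
          (PySem.Str.count (PySem.Str.slice sequence (some start) (some (start + k)))
            (String.ofList [c]) : Nat)
          = ((sequence.toList.drop start.toNat).take k.toNat).count c := by
        intro c
        rw [PySem.Str.count_eq, hseg]
        have h1 : (String.ofList [c]).toList = [c] := by simp
        rw [h1, pvCount_single]
      have hstepA : pvStepA sequence k d start
          = d.insert start (pvCnt ((sequence.toList.drop start.toNat).take k.toNat)) := by
        show d.insert start _ = _
        congr 1
        have e1 : ("A" : String) = String.ofList ['A'] := rfl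
        have e2 : ("C" : String) = String.ofList ['C'] := rfl
        have e3 : ("G" : String) = String.ofList ['G'] := rfl
        have e4 : ("T" : String) = String.ofList ['T'] := rfl
        rw [pvCnt, pvInner]
        show PySem.Dict.ofList _ = _
        rw [e1, e2, e3, e4, hval 'A', hval 'C', hval 'G', hval 'T']
        rfl
      rw [hstepA,
        ih (start + k) _ (by omega) (by omega)
          (by intro key hkey
              rcases (PySem.Dict.mem_keys_insert _ _ _ _).mp hkey with h | h
              · omega
              · exact lt_trans (hkeys key h) (by omega)),
        PySem.Dict.items_insert_of_not_contains _ _ (pvNotContains hkeys)]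
      obtain ⟨c, t, hct⟩ : ∃ c t, sequence.toList.drop start.toNat = c :: t := by
        cases hdr : sequence.toList.drop start.toNat with
        | nil =>
          exfalso
          have := List.drop_eq_nil_iff.mp hdr
          omega
        | cons c t => exact ⟨c, t, rfl⟩
      obtain ⟨K', hK'⟩ : ∃ K', k.toNat = K' + 1 := ⟨k.toNat - 1, by omega⟩
      rw [List.append_assoc]
      congr 1
      rw [hct, hK', pvChunks_cons]
      have hdrop : sequence.toList.drop (start + k).toNat = t.drop K' := by
        have h5 : sequence.toList.drop (start + k).toNat
            = (sequence.toList.drop start.toNat).drop k.toNat := by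
          rw [List.drop_drop]
          congr 1
          omega
        rw [h5, hct, hK']
        rfl
      have hstart : start + ((K' + 1 : Nat) : Int) = start + k := by omega
      rw [hdrop, hstart]
      rfl

-- ===== B characterized by pvChunks =====
-- one step of B on a dict whose chunk entry already exists
lemma pvB_step {k : Int} (hk : 1 ≤ k) (d : PySem.Dict Int (PySem.Dict String Int))
    (start off : Int) (inner : PySem.Dict String Int) (c : Char)
    (hmod : PySem.Int.mod start k = 0) (h0 : 0 ≤ off) (hoff : off < k) :
    pvStepB k (d.insert start inner) (start + off, c) = d.insert start (pvChStep inner c) := by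
  have hkey : (start + off) - PySem.Int.mod (start + off) k = start := pvKey_eq hk hmod h0 hoff
  by_cases hc : inner.contains (String.ofList [c]) = true
  · simp [pvStepB, hkey, PySem.Dict.contains_insert_self, PySem.Dict.getD_insert_self,
      PySem.Dict.insert_insert_self, pvChStep, hc]
  · simp [pvStepB, hkey, PySem.Dict.contains_insert_self, PySem.Dict.getD_insert_self,
      pvChStep, hc]

-- B's first step on a chunk: create the zeroed dict, then count the first character
lemma pvB_first {k : Int} (hk : 1 ≤ k) (d : PySem.Dict Int (PySem.Dict String Int))
    (start : Int) (c : Char) (hmod : PySem.Int.mod start k = 0)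
    (hkeys : ∀ key ∈ d.keys, key < start) :
    pvStepB k d (start, c) = d.insert start (pvChStep (pvInner 0 0 0 0) c) := by
  have hkey : start - PySem.Int.mod start k = start := by
    have := pvKey_eq (start := start) (off := 0) hk hmod (le_refl 0) (by omega)
    simpa using this
  have hnc : d.contains start = false := pvNotContains hkeys
  have hz : (PySem.Dict.ofList [("A",(0:Int)),("C",(0:Int)),("G",(0:Int)),("T",(0:Int))])
      = pvInner 0 0 0 0 := rfl
  by_cases hc : (pvInner 0 0 0 0).contains (String.ofList [c]) = true
  · simp [pvStepB, hkey, hnc, hz, PySem.Dict.getD_insert_self,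
      PySem.Dict.insert_insert_self, pvChStep, hc]
  · simp [pvStepB, hkey, hnc, hz, PySem.Dict.getD_insert_self, pvChStep, hc]

-- within one chunk, B only updates the chunk's entry
lemma pvB_seg {k : Int} (hk : 1 ≤ k) (start : Int) (hmod : PySem.Int.mod start k = 0) :
    ∀ (seg : List Char) (off : Int) (d : PySem.Dict Int (PySem.Dict String Int))
      (inner : PySem.Dict String Int), 0 ≤ off → off + seg.length ≤ k →
      List.foldl (pvStepB k) (d.insert start inner) (PySem.List.enumerate seg (start + off))
      = d.insert start (seg.foldl pvChStep inner) := by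
  intro seg
  induction seg with
  | nil => intro off d inner h0 hb; simp [PySem.List.enumerate_nil]
  | cons c rest ih =>
    intro off d inner h0 hb
    rw [PySem.List.enumerate_cons, List.foldl_cons,
      pvB_step hk d start off inner c hmod h0 (by simp at hb; omega)]
    have harith : start + off + 1 = start + (off + 1) := by ring
    rw [harith, ih (off + 1) d (pvChStep inner c) (by omega) (by simp at hb ⊢; omega)]
    rfl

lemma pvB_items {k : Int} (hk : 1 ≤ k) :
    ∀ (fuel : Nat) (cs : List Char) (start : Int)
      (d : PySem.Dict Int (PySem.Dict String Int)),
      cs.length ≤ fuel → 0 ≤ start → PySem.Int.mod start k = 0 →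
      (∀ key ∈ d.keys, key < start) →
      (List.foldl (pvStepB k) d (PySem.List.enumerate cs start)).items
      = d.items ++ pvChunks k.toNat start cs := by
  intro fuel
  induction fuel with
  | zero =>
    intro cs start d hfuel h0 hmod hkeys
    have : cs = [] := List.eq_nil_of_length_eq_zero (by omega)
    subst this
    simp [PySem.List.enumerate_nil, pvChunks_nil]
  | succ fuel ih =>
    intro cs start d hfuel h0 hmod hkeys
    cases cs with
    | nil => simp [PySem.List.enumerate_nil, pvChunks_nil]
    | cons c t =>
      obtain ⟨K', hK'⟩ : ∃ K', k.toNat = K' + 1 := ⟨k.toNat - 1, by omega⟩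
      rw [PySem.List.enumerate_cons, List.foldl_cons, pvB_first hk d start c hmod hkeys]
      have hsplit : t = t.take K' ++ t.drop K' := (List.take_append_drop K' t).symm
      rw [show PySem.List.enumerate t (start + 1)
            = PySem.List.enumerate (t.take K') (start + 1)
              ++ PySem.List.enumerate (t.drop K') (start + 1 + (t.take K').length) by
          conv_lhs => rw [hsplit]
          rw [PySem.List.enumerate_append],
        List.foldl_append]
      have hseg := pvB_seg hk start hmod (t.take K') 1 d (pvChStep (pvInner 0 0 0 0) c)
        (by omega) (by simp [List.length_take]; omega)
      rw [hseg]
      have hfold : (t.take K').foldl pvChStep (pvChStep (pvInner 0 0 0 0) c)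
          = pvCnt (c :: t.take K') := by
        have h6 : (t.take K').foldl pvChStep (pvChStep (pvInner 0 0 0 0) c)
            = (c :: t.take K').foldl pvChStep (pvInner 0 0 0 0) := rfl
        rw [h6, pvChFold]
        simp [pvCnt]
      rw [hfold]
      by_cases hle : t.length ≤ K'
      · have hdr : t.drop K' = [] := List.drop_eq_nil_of_le hle
        rw [hdr, PySem.List.enumerate_nil, List.foldl_nil,
          PySem.Dict.items_insert_of_not_contains _ _ (pvNotContains hkeys),
          hK', pvChunks_cons, hdr, pvChunks_nil]
      · have hlt : K' < t.length := by omega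
        have hlen : (t.take K').length = K' := by simp [List.length_take]; omega
        have hoff : start + 1 + ((t.take K').length : Int) = start + k := by
          rw [hlen]; omega
        rw [hoff,
          ih (t.drop K') (start + k) _ (by simp [List.length_drop] at hfuel ⊢; omega)
            (by omega) (pvMod_add_self hk hmod)
            (by intro key hkey
                rcases (PySem.Dict.mem_keys_insert _ _ _ _).mp hkey with h | h
                · omega
                · exact lt_trans (hkeys key h) (by omega)),
          PySem.Dict.items_insert_of_not_contains _ _ (pvNotContains hkeys),
          hK', pvChunks_cons]
        have hstart : start + ((K' + 1 : Nat) : Int) = start + k := by omega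
        rw [hstart, List.append_assoc]
        simp

-- ===== VERDICT (by name: the statement is the Claim_ definition above) =====
theorem count_nucleotides_by_kilobase_spec : Claim_equal_count_nucleotides_by_kilobase := by
  intro sequence kilobase_size _hdom hpre
  unfold Spec_count_nucleotides_by_kilobase
  have hk : 1 ≤ kilobase_size := hpre
  rw [pvA_eq, pvB_eq]
  have hmod0 : PySem.Int.mod 0 kilobase_size = 0 := by
    rw [PySem.Int.mod_eq_emod_of_pos (by omega : (0:Int) < kilobase_size)]
    simp
  have hA := pvA_items sequence kilobase_size hk sequence.toList.length 0 PySem.Dict.empty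
    (le_refl 0) (by omega) (by simp [PySem.Dict.keys_empty])
  have hB := pvB_items hk sequence.toList.length sequence.toList 0 PySem.Dict.empty
    (le_refl _) (le_refl 0) hmod0 (by simp [PySem.Dict.keys_empty])
  simp only [Int.toNat_zero, List.drop_zero] at hA
  rw [hA, hB]
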